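-- pv_equiv track=rewrite | github.com/daos-stack/daos | src/tests/ftest/tags.py | sorted_tags
-- ===== SOURCE A (Python) =====
-- STAGE_TYPE_TAGS = ('vm', 'hw', 'hw_vmd')
--
-- STAGE_SIZE_TAGS = ('medium', 'large')
--
-- STAGE_FREQUENCY_TAGS = ('all', 'pr', 'daily_regression', 'full_regression')
--
-- def sorted_tags(tags):
--     """Get a sorted list of tags.
--
--     Args:
--         tags (set): original tags
--
--     Returns:
--         list: sorted tags
--     """
--     tags_tmp = set(tags)
--     new_tags = []
--     for tag in STAGE_TYPE_TAGS + STAGE_SIZE_TAGS + STAGE_FREQUENCY_TAGS: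
--         if tag in tags_tmp:
--             new_tags.append(tag)
--             tags_tmp.remove(tag)
--     new_tags.extend(sorted(tags_tmp))
--     return new_tags
-- ===== SOURCE B (Python) =====
-- STAGE_TYPE_TAGS = ('vm', 'hw', 'hw_vmd')
--
-- STAGE_SIZE_TAGS = ('medium', 'large')
--
-- STAGE_FREQUENCY_TAGS = ('all', 'pr', 'daily_regression', 'full_regression')
--
-- _PRIORITY = STAGE_TYPE_TAGS + STAGE_SIZE_TAGS + STAGE_FREQUENCY_TAGS
--
-- _RANK = {tag: index for index, tag in enumerate(_PRIORITY)}
--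
--
-- def sorted_tags(tags):
--     """Get a sorted list of tags: known stage tags first in rank order, the rest alphabetical.
--
--     Args:
--         tags (set): original tags
--
--     Returns:
--         list: sorted tags
--     """
--     fallback = len(_PRIORITY)
--
--     def key(tag):
--         rank = _RANK.get(tag)
--         return (rank, '') if rank is not None else (fallback, tag)
--
--     return sorted(set(tags), key=key)
-- ===== Notes on version B (the rewrite author's own statement) =====
-- stated objective: idiomatic
-- what changed: Replaces A's fixed-order extraction loop over the priority tuple plus a separate sort of the leftovers by one sorted() pass over the deduplicated input with a precomputed rank-dict key (rank, '') for priority tags and (len, tag) for the rest.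
import Mathlib
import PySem

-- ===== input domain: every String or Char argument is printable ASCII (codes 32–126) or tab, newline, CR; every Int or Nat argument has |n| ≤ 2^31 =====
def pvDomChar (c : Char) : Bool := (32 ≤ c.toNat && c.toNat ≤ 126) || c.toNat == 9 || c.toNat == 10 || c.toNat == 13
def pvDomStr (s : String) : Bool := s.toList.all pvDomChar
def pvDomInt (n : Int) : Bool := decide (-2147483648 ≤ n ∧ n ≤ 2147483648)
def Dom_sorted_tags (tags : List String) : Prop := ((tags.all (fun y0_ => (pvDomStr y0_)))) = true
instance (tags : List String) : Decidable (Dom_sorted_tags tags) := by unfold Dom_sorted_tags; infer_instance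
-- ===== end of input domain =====

-- B replaces A's priority-extraction loop + separate sort of the leftovers by a single key-based sorted() pass (idiomatic; same cost).

-- ===== PORT A =====
def STAGE_TYPE_TAGS : List String := ["vm", "hw", "hw_vmd"]
def STAGE_SIZE_TAGS : List String := ["medium", "large"]
def STAGE_FREQUENCY_TAGS : List String := ["all", "pr", "daily_regression", "full_regression"]

def sorted_tags (tags : List String) : List String :=
  let tags_tmp : PySem.Set String := PySem.Set.ofList tags
  let st :=
    (STAGE_TYPE_TAGS ++ STAGE_SIZE_TAGS ++ STAGE_FREQUENCY_TAGS).foldl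
      (fun (s : List String × PySem.Set String) tag =>
        if tag ∈ s.2 then
          -- 'tags_tmp.remove(tag)' is guarded by the membership test, so it never raises; discard is exact here
          (s.1 ++ [tag], PySem.Set.discard s.2 tag)
        else s)
      ([], tags_tmp)
  st.1 ++ PySem.List.sorted st.2 (fun x => x) false

-- ===== PORT B =====
def pvPriority : List String := STAGE_TYPE_TAGS ++ STAGE_SIZE_TAGS ++ STAGE_FREQUENCY_TAGS

def pvRank : PySem.Dict String Int :=
  PySem.Dict.ofList ((PySem.List.enumerate pvPriority).map (fun p => (p.2, p.1)))

-- the two components of B's tuple-valued sort key ('(rank, "") if known else (fallback, tag)'); ported via sorted2 as PYSEM.md directs for tuple keys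
def pvKey1 (tag : String) : Int :=
  match PySem.Dict.get? pvRank tag with
  | some rank => rank
  | none => (pvPriority.length : Int)

def pvKey2 (tag : String) : String :=
  match PySem.Dict.get? pvRank tag with
  | some _ => ""
  | none => tag

def sorted_tags_alt (tags : List String) : List String :=
  PySem.List.sorted2 (PySem.Set.ofList tags) pvKey1 pvKey2 false

-- ===== PRECONDITION & SPEC =====
def Spec_sorted_tags (tags : List String) (out : List String) : Prop := out = sorted_tags_alt tags
instance (tags : List String) (out : List String) : Decidable (Spec_sorted_tags tags out) := by unfold Spec_sorted_tags; infer_instance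

-- ===== CLAIM (what is proved, stated in full; the proofs are below) =====
def Claim_equal_sorted_tags : Prop := ∀ (tags : List String), Dom_sorted_tags tags → Spec_sorted_tags tags (sorted_tags tags)

-- ===== LEMMAS AND PROOFS =====

-- B's tuple key packaged as a single key into the lexicographic order on Int × String
def pvKeyL (tag : String) : Int ×ₗ String := toLex (pvKey1 tag, pvKey2 tag)

-- sorted2's pairwise tuple comparison is exactly the lexicographic order on the packed key
lemma sorted2_eq_sorted_lex (xs : List String) (k1 : String → Int) (k2 : String → String) :
    PySem.List.sorted2 xs k1 k2 false = PySem.List.sorted xs (fun t => toLex (k1 t, k2 t)) false := by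
  have hbef : (fun a b => decide (k1 a < k1 b) || (!decide (k1 b < k1 a) && decide (k2 a < k2 b)))
      = (fun a b => decide ((toLex (k1 a, k2 a) : Int ×ₗ String) < toLex (k1 b, k2 b))) := by
    funext a b
    rcases lt_trichotomy (k1 a) (k1 b) with h | h | h
    · simp [Prod.Lex.lt_iff, h, not_lt_of_gt h]
    · simp [Prod.Lex.lt_iff, h]
    · simp [Prod.Lex.lt_iff, h, not_lt_of_gt h, ne_of_gt h]
  rw [PySem.List.sorted_eq_foldl_insertBy]
  simp only [PySem.List.sorted2, if_neg (by decide : ¬ (false = true))]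
  rw [hbef]

-- A's extraction loop: appends the priority tags present (in priority order) and removes them from the set
lemma foldA (P : List String) (hP : P.Nodup) (s : List String) (acc : List String) :
    P.foldl
      (fun (st : List String × PySem.Set String) tag =>
        if tag ∈ st.2 then (st.1 ++ [tag], PySem.Set.discard st.2 tag) else st)
      (acc, s)
    = (acc ++ P.filter (fun t => decide (t ∈ s)), s.filter (fun t => !decide (t ∈ P))) := by
  induction P generalizing s acc with
  | nil => simp
  | cons p ps ih =>
    simp only [List.foldl_cons, List.nodup_cons] at hP ⊢
    by_cases hp : p ∈ s
    · rw [if_pos hp, ih hP.2]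
      refine Prod.ext ?_ ?_
      · show acc ++ [p] ++ List.filter _ ps = acc ++ List.filter _ (p :: ps)
        have : List.filter (fun t => decide (t ∈ PySem.Set.discard s p)) ps
            = List.filter (fun t => decide (t ∈ s)) ps := by
          apply List.filter_congr
          intro x hx
          have hxp : x ≠ p := fun h => hP.1 (h ▸ hx)
          simp [PySem.Set.discard, hxp]
        rw [this]
        simp [hp, List.append_assoc]
      · show List.filter _ (PySem.Set.discard s p) = _
        simp only [PySem.Set.discard, List.filter_filter]
        apply List.filter_congr
        intro x hx
        by_cases hxp : x = p <;> simp [hxp]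
    · rw [if_neg hp, ih hP.2]
      refine Prod.ext ?_ ?_
      · show acc ++ _ = acc ++ List.filter _ (p :: ps)
        simp [hp]
      · apply List.filter_congr
        intro x hx
        by_cases hxp : x = p
        · subst hxp; exact absurd hx hp
        · simp [hxp]

lemma key_facts_mem : ∀ t ∈ pvPriority, pvKey1 t < (pvPriority.length : Int) ∧ pvKey2 t = "" := by
  decide

lemma prio_pairwise : pvPriority.Pairwise (fun a b => pvKeyL a < pvKeyL b) := by
  simp [pvKeyL, Prod.Lex.lt_iff]; decide

lemma key_facts_not_mem (t : String) (h : t ∉ pvPriority) :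
    pvKey1 t = (pvPriority.length : Int) ∧ pvKey2 t = t := by
  have h1 : PySem.Dict.get? pvRank t = none := by
    rw [PySem.Dict.get?_eq_none_iff_not_mem_keys]
    have hk : pvRank.keys = pvPriority := by decide
    rw [hk]; exact h
  constructor <;> simp [pvKey1, pvKey2, h1]

-- A's output is a strictly pvKeyL-increasing rearrangement of set(tags), hence equals B's single key-based sort
lemma main_eq (tags : List String) : sorted_tags tags = sorted_tags_alt tags := by
  have hPnd : pvPriority.Nodup := by decide
  show (((STAGE_TYPE_TAGS ++ STAGE_SIZE_TAGS ++ STAGE_FREQUENCY_TAGS).foldl _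
          ([], PySem.Set.ofList tags)).1 ++ _ : List String) = _
  rw [show STAGE_TYPE_TAGS ++ STAGE_SIZE_TAGS ++ STAGE_FREQUENCY_TAGS = pvPriority from rfl]
  rw [foldA pvPriority hPnd (PySem.Set.ofList tags) []]
  show pvPriority.filter (fun t => decide (t ∈ PySem.Set.ofList tags))
      ++ PySem.List.sorted ((PySem.Set.ofList tags).filter (fun t => !decide (t ∈ pvPriority))) (fun x => x) false
    = sorted_tags_alt tags
  rw [sorted_tags_alt, sorted2_eq_sorted_lex]
  show _ = PySem.List.sorted (PySem.Set.ofList tags) pvKeyL false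
  set S : List String := PySem.Set.ofList tags with hSdef
  have hS : S.Nodup := PySem.Set.nodup_ofList tags
  set rest : List String := S.filter (fun t => !decide (t ∈ pvPriority)) with hrest
  have hrestnd : rest.Nodup := hS.filter _
  have hsp : (PySem.List.sorted rest (fun x => x) false).Perm rest := PySem.List.sorted_perm rest _ _
  refine (PySem.List.sorted_eq_of_perm_of_pairwise_lt S _ pvKeyL ?_ ?_).symm
  · -- the rearrangement is a permutation of set(tags)
    refine List.Perm.trans (List.Perm.append_left _ hsp) ?_
    rw [List.perm_ext_iff_of_nodup ?_ hS]
    · intro x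
      simp only [List.mem_append, List.mem_filter, hrest]
      constructor
      · rintro (⟨_, hx⟩ | ⟨hx, _⟩)
        · exact of_decide_eq_true hx
        · exact hx
      · intro hx
        by_cases hp : x ∈ pvPriority
        · exact Or.inl ⟨hp, decide_eq_true hx⟩
        · exact Or.inr ⟨hx, by simp [hp]⟩
    · refine List.Nodup.append (hPnd.filter _) hrestnd ?_
      intro x hx1 hx2
      simp only [List.mem_filter, hrest] at hx1 hx2
      simp only [decide_eq_true_eq, Bool.not_eq_true', decide_eq_false_iff_not] at hx1 hx2
      exact hx2.2 hx1.1
  · -- and it is strictly increasing under pvKeyL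
    rw [List.pairwise_append]
    refine ⟨prio_pairwise.filter _, ?_, ?_⟩
    · have hle : (PySem.List.sorted rest (fun x => x) false).Pairwise (fun a b => a ≤ b) :=
        PySem.List.sorted_pairwise rest _
      have hnd : (PySem.List.sorted rest (fun x => x) false).Nodup := hsp.nodup_iff.mpr hrestnd
      have hlt : (PySem.List.sorted rest (fun x => x) false).Pairwise (fun a b => a < b) :=
        (hle.and hnd).imp (fun h => lt_of_le_of_ne h.1 h.2)
      refine hlt.imp_of_mem ?_
      intro a b ha hb hab
      have ha' : a ∉ pvPriority := by
        have := hsp.mem_iff.mp ha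
        simp only [hrest, List.mem_filter, Bool.not_eq_true', decide_eq_false_iff_not] at this
        exact this.2
      have hb' : b ∉ pvPriority := by
        have := hsp.mem_iff.mp hb
        simp only [hrest, List.mem_filter, Bool.not_eq_true', decide_eq_false_iff_not] at this
        exact this.2
      obtain ⟨ha1, ha2⟩ := key_facts_not_mem a ha'
      obtain ⟨hb1, hb2⟩ := key_facts_not_mem b hb'
      simp [pvKeyL, Prod.Lex.lt_iff, ha1, ha2, hb1, hb2, hab]
    · intro a ha b hb
      have ha' : a ∈ pvPriority := (List.mem_filter.mp ha).1
      have hb' : b ∉ pvPriority := by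
        have := hsp.mem_iff.mp hb
        simp only [hrest, List.mem_filter, Bool.not_eq_true', decide_eq_false_iff_not] at this
        exact this.2
      obtain ⟨ha1, ha2⟩ := key_facts_mem a ha'
      obtain ⟨hb1, hb2⟩ := key_facts_not_mem b hb'
      simp [pvKeyL, Prod.Lex.lt_iff, ha2, hb1, hb2]
      omega

-- ===== VERDICT (by name: the statement is the Claim_ definition above) =====
theorem sorted_tags_spec : Claim_equal_sorted_tags := by
  intro tags _
  unfold Spec_sorted_tags
  exact main_eq tags
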